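-- pv_equiv track=rewrite | github.com/kmad1729/EPIJudge | epi_judge_python/sort_increasing_decreasing_array.py | sort_k_increasing_decreasing_array
-- ===== SOURCE A (Python) =====
-- from typing import List, Tuple
-- from collections.abc import Sized, Iterable, Iterator
--
-- def merge_k_sorted_list_iterators(A: List[(Iterator[int])])  -> List[int]:
--     import heapq
--     curr_heap: List[Tuple[int, int, Iterator[int]]] = []
--     result: List[int] = []
--     for list_idx, curr_iter in enumerate(A):
--         elem = next(curr_iter, None)
--         if elem is not None:
--             elemToPush = (elem, list_idx, curr_iter)
--             heapq.heappush(curr_heap,  elemToPush)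
--     while len(curr_heap) > 0:
--         elem, curr_list_idx, curr_iter = heapq.heappop(curr_heap)
--         result.append(elem)
--         elem = next(curr_iter, None)
--         if elem is not None:
--             heapq.heappush(curr_heap, (elem, curr_list_idx, curr_iter))
--     return result
--
-- def sort_k_increasing_decreasing_array(A: List[int]) -> List[int]:
--     sorted_lists = []; is_increasing = True; start_idx = 0;
--     for i in range(1, len(A) + 1):
--         if (i == len(A) or
--             (is_increasing and A[i] < A[i-1]) or
--             ((not is_increasing) and A[i] > A[i-1])):
--             if is_increasing:
--                 sorted_lists.append(iter(A[start_idx:i]))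
--             else:
--                 sorted_lists.append(reversed(A[start_idx:i]))
--             is_increasing = not is_increasing
--             start_idx = i
--
--     return merge_k_sorted_list_iterators(sorted_lists)
-- ===== SOURCE B (Python) =====
-- def sort_k_increasing_decreasing_array(A):
--     # The k alternating runs merged ascending are exactly A sorted ascending
--     # (equal ints are indistinguishable), so sort directly.
--     return sorted(A)
-- ===== Notes on version B (the rewrite author's own statement) =====
-- stated objective: simpler
-- what changed: Replaces the run-splitting plus heap-based k-way merge of iterators by a single sorted(A) call: the merged output is exactly A sorted ascending since equal ints are indistinguishable.
import Mathlib
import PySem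

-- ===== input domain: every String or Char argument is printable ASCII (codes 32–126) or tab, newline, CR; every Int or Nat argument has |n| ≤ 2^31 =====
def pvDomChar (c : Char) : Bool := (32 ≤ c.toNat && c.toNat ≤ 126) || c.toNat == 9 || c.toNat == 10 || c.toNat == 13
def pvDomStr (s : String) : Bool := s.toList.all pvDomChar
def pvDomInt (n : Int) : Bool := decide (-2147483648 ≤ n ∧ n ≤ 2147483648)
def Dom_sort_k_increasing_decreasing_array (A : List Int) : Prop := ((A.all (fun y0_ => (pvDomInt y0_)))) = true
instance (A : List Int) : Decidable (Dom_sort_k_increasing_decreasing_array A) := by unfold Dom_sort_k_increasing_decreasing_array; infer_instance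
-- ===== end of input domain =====

-- B replaces the run-splitting + heap k-way merge by a single library sort (simpler).


-- ===== PORT A =====
-- heapq on (elem, list_idx, iterator) triples is modelled as a list kept sorted by the
-- lexicographic key (elem, list_idx): the list indices are distinct, so Python never
-- compares the iterators and the popped minimum is unique; push = ordered insert,
-- pop = head.  An iterator is its list of remaining elements.  Value-exact.
def pvKeyLt (a b : Int × Int × List Int) : Bool :=
  decide (a.1 < b.1) || (decide (a.1 = b.1) && decide (a.2.1 < b.2.1))

def pvHeapPush (h : List (Int × Int × List Int)) (x : Int × Int × List Int) :
    List (Int × Int × List Int) :=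
  match h with
  | [] => [x]
  | y :: t => if pvKeyLt x y then x :: y :: t else y :: pvHeapPush t x

def pvMeasure (h : List (Int × Int × List Int)) : Nat :=
  (h.map (fun e => e.2.2.length + 1)).sum

theorem pvMeasure_push (h : List (Int × Int × List Int)) (x : Int × Int × List Int) :
    pvMeasure (pvHeapPush h x) = pvMeasure h + (x.2.2.length + 1) := by
  induction h with
  | nil => simp [pvHeapPush, pvMeasure]
  | cons y t ih =>
    simp only [pvHeapPush]
    split
    · simp [pvMeasure]; ring
    · simp only [pvMeasure, List.map_cons, List.sum_cons] at ih ⊢; omega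

-- the while-loop of merge_k_sorted_list_iterators
def pvMergeLoop (h : List (Int × Int × List Int)) (result : List Int) : List Int :=
  match h with
  | [] => result
  | (e, _, []) :: t => pvMergeLoop t (result ++ [e])
  | (e, i, x :: rs) :: t => pvMergeLoop (pvHeapPush t (x, i, rs)) (result ++ [e])
termination_by pvMeasure h
decreasing_by
  · simp only [pvMeasure, List.map_cons, List.sum_cons]; omega
  · rw [pvMeasure_push]
    simp only [pvMeasure, List.map_cons, List.sum_cons, List.length_cons]; omega

-- the initial for-loop of merge_k_sorted_list_iterators (next(it, None) on x::rs gives x)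
def pvInitHeap (ls : List (List Int)) : List (Int × Int × List Int) :=
  (PySem.List.enumerate ls).foldl
    (fun h p => match p.2 with
      | [] => h
      | x :: rs => pvHeapPush h (x, p.1, rs)) []

-- the if-condition and loop body of the run-splitting for-loop
def pvRunCond (A : List Int) (inc : Bool) (i : Int) : Bool :=
  decide (i = (A.length : Int)) ||
    (inc && decide (PySem.List.pyGetD A i 0 < PySem.List.pyGetD A (i - 1) 0)) ||
    (!inc && decide (PySem.List.pyGetD A (i - 1) 0 < PySem.List.pyGetD A i 0))

def pvRunStep (A : List Int) (s : List (List Int) × Bool × Int) (i : Int) :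
    List (List Int) × Bool × Int :=
  if pvRunCond A s.2.1 i then
    (s.1 ++ [if s.2.1 then PySem.List.slice A (some s.2.2) (some i)
             else (PySem.List.slice A (some s.2.2) (some i)).reverse], !s.2.1, i)
  else s

def sort_k_increasing_decreasing_array (A : List Int) : List Int :=
  let st := (PySem.List.pyRange 1 ((A.length : Int) + 1)).foldl (pvRunStep A) ([], true, 0)
  pvMergeLoop (pvInitHeap st.1) []

-- ===== PORT B =====
def sort_k_increasing_decreasing_array_alt (A : List Int) : List Int :=
  PySem.List.sorted A (fun x => x)

-- ===== PRECONDITION & SPEC =====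
def Spec_sort_k_increasing_decreasing_array (A : List Int) (out : List Int) : Prop := out = sort_k_increasing_decreasing_array_alt A
instance (A : List Int) (out : List Int) : Decidable (Spec_sort_k_increasing_decreasing_array A out) := by unfold Spec_sort_k_increasing_decreasing_array; infer_instance

-- ===== CLAIM (what is proved, stated in full; the proofs are below) =====
def Claim_equal_sort_k_increasing_decreasing_array : Prop := ∀ (A : List Int), Dom_sort_k_increasing_decreasing_array A → Spec_sort_k_increasing_decreasing_array A (sort_k_increasing_decreasing_array A)

-- ===== LEMMAS AND PROOFS =====

-- multiset of all elements still held by the heap entries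
def pvBag (h : List (Int × Int × List Int)) : List Int :=
  (h.map (fun e => e.1 :: e.2.2)).flatten

theorem pvKey_le_of_lt {a b : Int × Int × List Int} (h : pvKeyLt a b = true) : a.1 ≤ b.1 := by
  simp [pvKeyLt] at h
  rcases h with h | h
  · exact le_of_lt h
  · exact le_of_eq h.1

theorem pvKey_ge_of_not {a b : Int × Int × List Int} (h : ¬ pvKeyLt a b = true) : b.1 ≤ a.1 := by
  simp [pvKeyLt] at h
  exact h.1

theorem push_perm (h : List (Int × Int × List Int)) (x : Int × Int × List Int) :
    (pvHeapPush h x).Perm (x :: h) := by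
  induction h with
  | nil => exact List.Perm.refl _
  | cons y t ih =>
    simp only [pvHeapPush]
    split
    · exact List.Perm.refl _
    · exact (ih.cons y).trans (List.Perm.swap x y t)

theorem push_bag (h : List (Int × Int × List Int)) (x : Int × Int × List Int) :
    (pvBag (pvHeapPush h x)).Perm ((x.1 :: x.2.2) ++ pvBag h) := by
  simpa [pvBag] using ((push_perm h x).map (fun e => e.1 :: e.2.2)).flatten

theorem push_pairwise {h : List (Int × Int × List Int)} (x : Int × Int × List Int)
    (hh : h.Pairwise (fun a b => a.1 ≤ b.1)) :
    (pvHeapPush h x).Pairwise (fun a b => a.1 ≤ b.1) := by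
  induction h with
  | nil => simp [pvHeapPush]
  | cons y t ih =>
    rw [List.pairwise_cons] at hh
    simp only [pvHeapPush]
    split
    · rename_i hlt
      refine List.pairwise_cons.2 ⟨?_, List.pairwise_cons.2 ⟨hh.1, hh.2⟩⟩
      intro z hz
      rcases List.mem_cons.1 hz with rfl | hz
      · exact pvKey_le_of_lt hlt
      · exact le_trans (pvKey_le_of_lt hlt) (hh.1 z hz)
    · rename_i hnlt
      refine List.pairwise_cons.2 ⟨?_, ih hh.2⟩
      intro z hz
      rcases List.mem_cons.1 ((push_perm t x).mem_iff.1 hz) with rfl | hz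
      · exact pvKey_ge_of_not hnlt
      · exact hh.1 z hz

theorem merge_perm (h : List (Int × Int × List Int)) (result : List Int) :
    (pvMergeLoop h result).Perm (result ++ pvBag h) := by
  fun_induction pvMergeLoop h result with
  | case1 result => simp [pvBag]
  | case2 result e i t ih =>
    refine ih.trans ?_
    simp [pvBag]
  | case3 result e i x rs t ih =>
    refine ih.trans ?_
    refine (List.Perm.append_left (result ++ [e]) (push_bag t (x, i, rs))).trans ?_
    simp [pvBag]

theorem head_le_bag {e : Int} {i : Int} {rest : List Int} {t : List (Int × Int × List Int)}
    (hh : ((e, i, rest) :: t).Pairwise (fun a b => a.1 ≤ b.1))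
    (hr : ∀ x ∈ (e, i, rest) :: t, (x.1 :: x.2.2).Pairwise (fun a b : Int => a ≤ b)) :
    ∀ v ∈ pvBag ((e, i, rest) :: t), e ≤ v := by
  intro v hv
  simp only [pvBag, List.map_cons, List.flatten_cons, List.mem_append] at hv
  rcases hv with hv | hv
  · rcases List.mem_cons.1 hv with rfl | hv
    · exact le_refl v
    · exact List.rel_of_pairwise_cons (hr _ List.mem_cons_self) hv
  · rcases List.mem_flatten.1 hv with ⟨l, hl, hvl⟩
    rcases List.mem_map.1 hl with ⟨y, hy, rfl⟩
    have h1 : e ≤ y.1 := List.rel_of_pairwise_cons hh hy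
    rcases List.mem_cons.1 hvl with rfl | hvl
    · exact h1
    · exact le_trans h1 (List.rel_of_pairwise_cons (hr _ (List.mem_cons_of_mem _ hy)) hvl)

theorem merge_pairwise (h : List (Int × Int × List Int)) (result : List Int) :
    h.Pairwise (fun a b => a.1 ≤ b.1) →
    (∀ x ∈ h, (x.1 :: x.2.2).Pairwise (fun a b : Int => a ≤ b)) →
    (∀ r ∈ result, ∀ v ∈ pvBag h, r ≤ v) →
    result.Pairwise (fun a b : Int => a ≤ b) →
    (pvMergeLoop h result).Pairwise (fun a b : Int => a ≤ b) := by
  fun_induction pvMergeLoop h result with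
  | case1 result => intro _ _ _ hres; exact hres
  | case2 result e i t ih =>
    intro hh hr hb hres
    have hmem : (e : Int) ∈ pvBag ((e, i, ([] : List Int)) :: t) := by simp [pvBag]
    have hle := head_le_bag hh hr
    refine ih (List.pairwise_cons.1 hh).2 (fun x hx => hr x (List.mem_cons_of_mem _ hx)) ?_ ?_
    · intro r hrm v hv
      have hv' : v ∈ pvBag ((e, i, ([] : List Int)) :: t) := by
        simp only [pvBag, List.map_cons, List.flatten_cons]
        exact List.mem_append_right _ hv
      rcases List.mem_append.1 hrm with hrm | hrm
      · exact hb r hrm v hv'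
      · rcases List.mem_singleton.1 hrm with rfl
        exact hle v hv'
    · refine List.pairwise_append.2 ⟨hres, List.pairwise_singleton _ _, ?_⟩
      intro r hrm v hv
      rcases List.mem_singleton.1 hv with rfl
      exact hb r hrm v hmem
  | case3 result e i x rs t ih =>
    intro hh hr hb hres
    have hmem : (e : Int) ∈ pvBag ((e, i, x :: rs) :: t) := by simp [pvBag]
    have hle := head_le_bag hh hr
    have hhead := hr _ (List.mem_cons_self (a := (e, i, x :: rs)) (l := t))
    refine ih (push_pairwise _ (List.pairwise_cons.1 hh).2) ?_ ?_ ?_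
    · intro y hy
      rcases List.mem_cons.1 ((push_perm t (x, i, rs)).mem_iff.1 hy) with rfl | hy
      · exact (List.pairwise_cons.1 hhead).2
      · exact hr y (List.mem_cons_of_mem _ hy)
    · intro r hrm v hv
      have hv' : v ∈ pvBag ((e, i, x :: rs) :: t) := by
        simp only [pvBag, List.map_cons, List.flatten_cons]
        rcases List.mem_append.1 ((push_bag t (x, i, rs)).mem_iff.1 hv) with hv2 | hv2
        · exact List.mem_append_left _ (List.mem_cons_of_mem _ hv2)
        · exact List.mem_append_right _ hv2
      rcases List.mem_append.1 hrm with hrm | hrm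
      · exact hb r hrm v hv'
      · rcases List.mem_singleton.1 hrm with rfl
        exact hle v hv'
    · refine List.pairwise_append.2 ⟨hres, List.pairwise_singleton _ _, ?_⟩
      intro r hrm v hv
      rcases List.mem_singleton.1 hv with rfl
      exact hb r hrm v hmem

-- ===== initial heap =====

theorem init_fold_bag (ls : List (List Int)) (k : Int) (h : List (Int × Int × List Int)) :
    (pvBag ((PySem.List.enumerate ls k).foldl
      (fun h p => match p.2 with
        | [] => h
        | x :: rs => pvHeapPush h (x, p.1, rs)) h)).Perm (pvBag h ++ ls.flatten) := by
  induction ls generalizing k h with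
  | nil => simp [PySem.List.enumerate]
  | cons l ls ih =>
    rw [PySem.List.enumerate_cons, List.foldl_cons]
    cases l with
    | nil => simpa using ih (k + 1) h
    | cons x rs =>
      refine (ih (k + 1) (pvHeapPush h (x, k, rs))).trans ?_
      refine ((push_bag h (x, k, rs)).append_right ls.flatten).trans ?_
      rw [List.flatten_cons, List.append_assoc]
      exact List.perm_append_comm_assoc _ _ _

theorem init_fold_pairwise (ls : List (List Int)) (k : Int) (h : List (Int × Int × List Int))
    (hh : h.Pairwise (fun a b => a.1 ≤ b.1)) :
    ((PySem.List.enumerate ls k).foldl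
      (fun h p => match p.2 with
        | [] => h
        | x :: rs => pvHeapPush h (x, p.1, rs)) h).Pairwise (fun a b => a.1 ≤ b.1) := by
  induction ls generalizing k h with
  | nil => simpa [PySem.List.enumerate] using hh
  | cons l ls ih =>
    rw [PySem.List.enumerate_cons, List.foldl_cons]
    cases l with
    | nil => exact ih (k + 1) h hh
    | cons x rs => exact ih (k + 1) _ (push_pairwise _ hh)

theorem init_fold_runs (ls : List (List Int)) (k : Int) (h : List (Int × Int × List Int))
    (hh : ∀ x ∈ h, (x.1 :: x.2.2).Pairwise (fun a b : Int => a ≤ b))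
    (hl : ∀ l ∈ ls, l.Pairwise (fun a b : Int => a ≤ b)) :
    ∀ x ∈ (PySem.List.enumerate ls k).foldl
      (fun h p => match p.2 with
        | [] => h
        | x :: rs => pvHeapPush h (x, p.1, rs)) h,
      (x.1 :: x.2.2).Pairwise (fun a b : Int => a ≤ b) := by
  induction ls generalizing k h with
  | nil => simpa [PySem.List.enumerate] using hh
  | cons l ls ih =>
    rw [PySem.List.enumerate_cons, List.foldl_cons]
    cases l with
    | nil => exact ih (k + 1) h hh (fun l hl' => hl l (List.mem_cons_of_mem _ hl'))
    | cons x rs =>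
      refine ih (k + 1) _ ?_ (fun l hl' => hl l (List.mem_cons_of_mem _ hl'))
      intro y hy
      have hy' : y ∈ pvHeapPush h (x, k, rs) := hy
      rcases List.mem_cons.1 ((push_perm h (x, k, rs)).mem_iff.1 hy') with rfl | hy2
      · exact hl _ List.mem_cons_self
      · exact hh y hy2

-- ===== run-splitting phase =====

theorem getD_rel_of_adj (A : List Int) (st i : Nat) (R : Int → Int → Prop)
    (htrans : ∀ a b c, R a b → R b c → R a c)
    (hadj : ∀ j, st ≤ j → j + 1 < i → R (A.getD j 0) (A.getD (j + 1) 0)) :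
    ∀ p q, st ≤ p → p < q → q < i → R (A.getD p 0) (A.getD q 0) := by
  intro p q hp hpq hq
  induction q with
  | zero => omega
  | succ q' ihq =>
    rcases Nat.lt_or_ge p q' with hlt | hge
    · exact htrans _ _ _ (ihq hlt (by omega)) (hadj q' (by omega) (by omega))
    · have hpq' : p = q' := by omega
      subst hpq'
      exact hadj p hp (by omega)

theorem seg_pairwise (A : List Int) (st i : Nat) (R : Int → Int → Prop)
    (htrans : ∀ a b c, R a b → R b c → R a c)
    (hadj : ∀ j, st ≤ j → j + 1 < i → R (A.getD j 0) (A.getD (j + 1) 0)) :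
    ((A.drop st).take (i - st)).Pairwise R := by
  rw [List.pairwise_iff_getElem]
  intro p q hp hq hpq
  have hlen : ((A.drop st).take (i - st)).length ≤ i - st := by
    simp [List.length_take]
  have hlen2 : ((A.drop st).take (i - st)).length ≤ A.length - st := by
    simp [List.length_take, List.length_drop]
  have hgp : ((A.drop st).take (i - st))[p] = A.getD (st + p) 0 := by
    rw [List.getElem_take, List.getElem_drop, List.getD_eq_getElem]
  have hgq : ((A.drop st).take (i - st))[q] = A.getD (st + q) 0 := by
    rw [List.getElem_take, List.getElem_drop, List.getD_eq_getElem]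
  rw [hgp, hgq]
  exact getD_rel_of_adj A st i R htrans hadj (st + p) (st + q) (by omega) (by omega) (by omega)

-- the loop invariant at the point where index i is next to process
def pvInv (A : List Int) (s : List (List Int) × Bool × Int) (i : Nat) : Prop :=
  ∃ st : Nat, s.2.2 = (st : Int) ∧ st ≤ i ∧
    s.1.flatten.Perm (A.take st) ∧
    (∀ p ∈ s.1, p.Pairwise (fun a b : Int => a ≤ b)) ∧
    (∀ j : Nat, st ≤ j → j + 1 < i →
      (s.2.1 = true → A.getD j 0 ≤ A.getD (j + 1) 0) ∧
      (s.2.1 = false → A.getD (j + 1) 0 ≤ A.getD j 0)) ∧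
    (i = A.length + 1 → st = A.length)

theorem step_inv (A : List Int) (s : List (List Int) × Bool × Int) (i : Nat)
    (h1 : 1 ≤ i) (h2 : i ≤ A.length) (hinv : pvInv A s i) :
    pvInv A (pvRunStep A s (i : Int)) (i + 1) := by
  obtain ⟨st, hst, hsti, hperm, hpw, hadj, _⟩ := hinv
  obtain ⟨lists, inc, stI⟩ := s
  simp only at hst hperm hpw hadj
  subst hst
  have hslice : PySem.List.slice A (some ((st : Nat) : Int)) (some (i : Int)) =
      (A.drop st).take (i - st) := PySem.List.slice_natCast A st i
  by_cases hc : pvRunCond A inc (i : Int) = true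
  · -- a run is cut at i: the piece is appended and a new run starts at i
    have hs' : pvRunStep A (lists, inc, ((st : Nat) : Int)) (i : Int) =
        (lists ++ [if inc then PySem.List.slice A (some ((st : Nat) : Int)) (some (i : Int))
                   else (PySem.List.slice A (some ((st : Nat) : Int)) (some (i : Int))).reverse],
         !inc, (i : Int)) := by
      simp [pvRunStep, hc]
    rw [hs']
    have hsegpw : (if inc then PySem.List.slice A (some ((st : Nat) : Int)) (some (i : Int))
        else (PySem.List.slice A (some ((st : Nat) : Int)) (some (i : Int))).reverse).Pairwise
        (fun a b : Int => a ≤ b) := by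
      cases inc with
      | true =>
        simp only [if_true]
        rw [hslice]
        exact seg_pairwise A st i _ (fun a b c => le_trans)
          (fun j hj hji => (hadj j hj hji).1 rfl)
      | false =>
        simp only [if_false, Bool.false_eq_true]
        rw [hslice]
        rw [List.pairwise_reverse]
        exact seg_pairwise A st i _ (fun a b c hab hbc => le_trans hbc hab)
          (fun j hj hji => (hadj j hj hji).2 rfl)
    refine ⟨i, rfl, by omega, ?_, ?_, ?_, ?_⟩
    · -- permutation: old pieces ++ new piece ~ A.take i
      simp only [List.flatten_append, List.flatten_cons, List.flatten_nil, List.append_nil]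
      have hpiece : (if inc then PySem.List.slice A (some ((st : Nat) : Int)) (some (i : Int))
          else (PySem.List.slice A (some ((st : Nat) : Int)) (some (i : Int))).reverse).Perm
          ((A.drop st).take (i - st)) := by
        cases inc with
        | true => simp only [if_true]; rw [hslice]
        | false =>
          simp only [if_false, Bool.false_eq_true]
          rw [hslice]
          exact List.reverse_perm _
      refine (hperm.append hpiece).trans ?_
      have h4 : A.take st ++ (A.drop st).take (i - st) = A.take i := by
        have h3 : st + (i - st) = i := by omega
        conv_rhs => rw [← h3, List.take_add]
      rw [h4]
    · intro p hp
      rcases List.mem_append.1 hp with hp | hp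
      · exact hpw p hp
      · rcases List.mem_singleton.1 hp with rfl
        exact hsegpw
    · intro j hj hji
      exact absurd hji (by omega)
    · intro hlen
      omega
  · -- the run continues through i
    have hs' : pvRunStep A (lists, inc, ((st : Nat) : Int)) (i : Int) =
        (lists, inc, ((st : Nat) : Int)) := by
      simp only [pvRunStep]
      rw [if_neg hc]
    rw [hs']
    have hne : i ≠ A.length := by
      intro hEq
      apply hc
      have hEq' : ((i : Nat) : Int) = ((A.length : Nat) : Int) := by rw [hEq]
      simp [pvRunCond, hEq']
    have hilt : i < A.length := by omega
    have hgetI : PySem.List.pyGetD A (i : Int) 0 = A.getD i 0 := PySem.List.pyGetD_natCast A i 0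
    have hgetI1 : PySem.List.pyGetD A ((i : Int) - 1) 0 = A.getD (i - 1) 0 := by
      have hcast : ((i : Int) - 1) = (((i - 1 : Nat)) : Int) := by omega
      rw [hcast]
      exact PySem.List.pyGetD_natCast A (i - 1) 0
    refine ⟨st, rfl, by omega, hperm, hpw, ?_, by omega⟩
    intro j hj hji
    rcases Nat.lt_or_ge (j + 1) i with hlt | hge
    · exact hadj j hj hlt
    · have hjeq : j = i - 1 := by omega
      subst hjeq
      have hi1 : i - 1 + 1 = i := by omega
      rw [hi1]
      constructor <;> intro hincv
      · -- increasing: the condition did not fire, so A[i-1] ≤ A[i]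
        subst hincv
        by_contra hcon
        apply hc
        have hlt' : PySem.List.pyGetD A (i : Int) 0 < PySem.List.pyGetD A ((i : Int) - 1) 0 := by
          rw [hgetI, hgetI1]; omega
        unfold pvRunCond
        rw [decide_eq_true hlt']
        simp
      · subst hincv
        by_contra hcon
        apply hc
        have hlt' : PySem.List.pyGetD A ((i : Int) - 1) 0 < PySem.List.pyGetD A (i : Int) 0 := by
          rw [hgetI, hgetI1]; omega
        unfold pvRunCond
        rw [decide_eq_true hlt']
        simp

theorem run_go (A : List Int) (m : Nat) : ∀ (i : Nat) (s : List (List Int) × Bool × Int),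
    i + m = A.length + 1 → 1 ≤ i → pvInv A s i →
    (((PySem.List.pyRange (i : Int) ((A.length : Int) + 1)).foldl (pvRunStep A) s).1.flatten.Perm A ∧
     ∀ p ∈ ((PySem.List.pyRange (i : Int) ((A.length : Int) + 1)).foldl (pvRunStep A) s).1,
       p.Pairwise (fun a b : Int => a ≤ b)) := by
  induction m with
  | zero =>
    intro i s h1 h2 hinv
    have hieq : (i : Int) = (A.length : Int) + 1 := by omega
    have hnil : PySem.List.pyRange (i : Int) ((A.length : Int) + 1) = [] := by
      apply List.eq_nil_of_length_eq_zero
      rw [hieq, PySem.List.length_pyRange_one]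
      omega
    rw [hnil]
    simp only [List.foldl_nil]
    obtain ⟨st, _, _, hperm, hpw, _, hfin⟩ := hinv
    have hst : st = A.length := hfin (by omega)
    subst hst
    rw [List.take_length] at hperm
    exact ⟨hperm, hpw⟩
  | succ m ih =>
    intro i s h1 h2 hinv
    have hlt : (i : Int) < (A.length : Int) + 1 := by omega
    rw [PySem.List.pyRange_one_cons hlt, List.foldl_cons]
    have hcast : (i : Int) + 1 = (((i + 1 : Nat)) : Int) := by omega
    rw [hcast]
    exact ih (i + 1) (pvRunStep A s (i : Int)) (by omega) (by omega)
      (step_inv A s i h2 (by omega) hinv)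

theorem portA_eq (A : List Int) :
    sort_k_increasing_decreasing_array A = PySem.List.sorted A (fun x => x) := by
  have h0 : pvInv A ([], true, 0) 1 := by
    refine ⟨0, rfl, by omega, by simp, by simp, ?_, by omega⟩
    intro j hj hji
    exact absurd hji (by omega)
  have hrun := run_go A A.length 1 ([], true, 0) (by omega) (by omega) h0
  have hone : ((1 : Nat) : Int) = (1 : Int) := by norm_num
  rw [hone] at hrun
  set fs := (PySem.List.pyRange 1 ((A.length : Int) + 1)).foldl (pvRunStep A) ([], true, 0) with hfs
  have hbag : (pvBag (pvInitHeap fs.1)).Perm A := by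
    have h1 := init_fold_bag fs.1 0 []
    have h2 : pvBag ([] : List (Int × Int × List Int)) = [] := by simp [pvBag]
    rw [h2, List.nil_append] at h1
    have h3 : (pvBag (pvInitHeap fs.1)).Perm fs.1.flatten := by
      simpa [pvInitHeap] using h1
    exact h3.trans hrun.1
  have hhw : (pvInitHeap fs.1).Pairwise (fun a b => a.1 ≤ b.1) := by
    simpa [pvInitHeap] using init_fold_pairwise fs.1 0 [] (by simp)
  have hruns : ∀ x ∈ pvInitHeap fs.1, (x.1 :: x.2.2).Pairwise (fun a b : Int => a ≤ b) := by
    simpa [pvInitHeap] using init_fold_runs fs.1 0 [] (by simp) hrun.2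
  have hperm : (pvMergeLoop (pvInitHeap fs.1) []).Perm A :=
    (merge_perm (pvInitHeap fs.1) []).trans hbag
  have hpw : (pvMergeLoop (pvInitHeap fs.1) []).Pairwise (fun a b : Int => a ≤ b) :=
    merge_pairwise (pvInitHeap fs.1) [] hhw hruns (by simp) (by simp)
  have hend := PySem.List.sorted_id_eq_of_perm_of_pairwise A (pvMergeLoop (pvInitHeap fs.1) []) hperm hpw
  show pvMergeLoop (pvInitHeap fs.1) [] = PySem.List.sorted A (fun x => x)
  exact hend.symm

-- ===== VERDICT (by name: the statement is the Claim_ definition above) =====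
theorem sort_k_increasing_decreasing_array_spec : Claim_equal_sort_k_increasing_decreasing_array := by
  intro A _
  unfold Spec_sort_k_increasing_decreasing_array sort_k_increasing_decreasing_array_alt
  exact portA_eq A
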